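-- pv_equiv track=rewrite | github.com/ashishkulkarnii/leetcode | 3783-mirror-distance-of-an-integer/3783-mirror-distance-of-an-integer.py | mirrorDistance
-- ===== SOURCE A (Python) =====
-- def mirrorDistance(n: int) -> int:
--     def reverse(n):
--         res = 0
--         while n > 0:
--             res = res * 10 + n % 10
--             n //= 10
--         return res
--     return abs(n - reverse(n))
-- ===== SOURCE B (Python) =====
-- def mirrorDistance(n: int) -> int:
--     if n <= 0:
--         return abs(n)
--     r = sum(int(c) * 10 ** i for i, c in enumerate(str(n)))
--     return abs(n - r)
-- ===== Notes on version B (the rewrite author's own statement) =====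
-- stated objective: alternative
-- what changed: Replaces A's arithmetic Horner loop (peel the low digit with mod/floor-div and accumulate) by a positional sum over the decimal string: each character of str(n) at index i contributes int(c) times the i-th power of ten, which directly yields the digit-reverse.
import Mathlib
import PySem

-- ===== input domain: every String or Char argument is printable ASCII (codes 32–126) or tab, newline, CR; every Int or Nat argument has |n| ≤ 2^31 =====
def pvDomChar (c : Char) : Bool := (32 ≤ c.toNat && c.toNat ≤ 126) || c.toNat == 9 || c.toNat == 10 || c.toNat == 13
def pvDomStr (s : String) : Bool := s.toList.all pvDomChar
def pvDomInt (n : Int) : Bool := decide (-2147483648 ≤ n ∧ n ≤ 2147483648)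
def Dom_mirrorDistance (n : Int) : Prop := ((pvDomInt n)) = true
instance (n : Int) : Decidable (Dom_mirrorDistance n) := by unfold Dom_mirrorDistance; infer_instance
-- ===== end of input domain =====

-- B replaces A's arithmetic Horner loop by a positional sum over the decimal string
-- (int(c) * 10**i per character of str(n)) — an alternative, equally costly algorithm.


-- ===== PORT A =====
-- inner helper 'reverse': res = 0; while n > 0: res = res*10 + n%10; n //= 10
def pvRevAux (n res : Int) : Int :=
  if 0 < n then
    pvRevAux (PySem.Int.floordiv n 10) (res * 10 + PySem.Int.mod n 10)
  else res
termination_by n.toNat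
decreasing_by
  rw [PySem.Int.floordiv_eq_ediv_of_pos (by norm_num : (0:Int) < 10)]
  omega

def mirrorDistance (n : Int) : Int := |n - pvRevAux n 0|

-- ===== PORT B =====
-- int(c) on a single decimal digit never raises here, so '.getD 0' is exact;
-- 10 ** i ported as 10 ^ i.toNat is exact since enumerate indices are ≥ 0.
def mirrorDistance_alt (n : Int) : Int :=
  if n ≤ 0 then |n|
  else
    let r : Int :=
      ((PySem.List.enumerate (PySem.Int.toChars n)).map
        (fun ic => (PySem.Int.ofChars? [ic.2]).getD 0 * 10 ^ ic.1.toNat)).sum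
    |n - r|

-- ===== PRECONDITION & SPEC =====
def Spec_mirrorDistance (n : Int) (out : Int) : Prop := out = mirrorDistance_alt n
instance (n : Int) (out : Int) : Decidable (Spec_mirrorDistance n out) := by unfold Spec_mirrorDistance; infer_instance

-- ===== CLAIM (what is proved, stated in full; the proofs are below) =====
def Claim_equal_mirrorDistance : Prop := ∀ (n : Int), Dom_mirrorDistance n → Spec_mirrorDistance n (mirrorDistance n)

-- ===== LEMMAS AND PROOFS =====

-- B's per-character summand and sum, as proof-side names
def pvTerm (ic : Int × Char) : Int := (PySem.Int.ofChars? [ic.2]).getD 0 * 10 ^ ic.1.toNat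

def pvSum (cs : List Char) : Int := ((PySem.List.enumerate cs).map pvTerm).sum

lemma pvTerm_digitChar (d : Nat) (h : d < 10) (k : Nat) :
    pvTerm ((k : Int), d.digitChar) = (d : Int) * 10 ^ k := by
  have : (PySem.Int.ofChars? [d.digitChar]).getD 0 = (d : Int) := by
    interval_cases d <;> decide
  simp [pvTerm, this]

lemma pvSum_append_digit (cs : List Char) (d : Nat) (h : d < 10) :
    pvSum (cs ++ [d.digitChar]) = pvSum cs + (d : Int) * 10 ^ cs.length := by
  unfold pvSum
  rw [PySem.List.enumerate_append]
  simp only [List.map_append, List.sum_append]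
  congr 1
  simp [PySem.List.enumerate_cons, PySem.List.enumerate_nil,
    pvTerm_digitChar d h cs.length]

lemma pvRevAux_nonpos (n res : Int) (h : ¬ 0 < n) : pvRevAux n res = res := by
  rw [pvRevAux]; simp [h]

lemma pvRevAux_eq_pvSum (m : Nat) (hm : 1 ≤ m) :
    ∀ res : Int,
      pvRevAux (m : Int) res
        = pvSum (Nat.toDigits 10 m) + res * 10 ^ (Nat.toDigits 10 m).length := by
  induction m using Nat.strong_induction_on with
  | _ m ih =>
    intro res
    have hdiv : PySem.Int.floordiv (m : Int) 10 = ((m / 10 : Nat) : Int) := by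
      rw [PySem.Int.floordiv_eq_ediv_of_pos (by norm_num : (0:Int) < 10)]; omega
    have hmod : PySem.Int.mod (m : Int) 10 = ((m % 10 : Nat) : Int) := by
      rw [PySem.Int.mod_eq_emod_of_pos (by norm_num : (0:Int) < 10)]; omega
    rw [pvRevAux]
    have h0 : 0 < (m : Int) := by exact_mod_cast hm
    simp only [h0, if_pos, hdiv, hmod]
    by_cases hlt : m < 10
    · -- one digit: m / 10 = 0
      have h10 : (m / 10 : Nat) = 0 := by omega
      rw [h10, pvRevAux_nonpos _ _ (by norm_num)]
      rw [Nat.toDigits_of_lt_base hlt]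
      have hm10 : m % 10 = m := by omega
      have hterm : pvTerm (0, m.digitChar) = (m : Int) := by
        have := pvTerm_digitChar m hlt 0
        simpa using this
      simp [pvSum, PySem.List.enumerate_cons, PySem.List.enumerate_nil, hm10, hterm]
      ring
    · -- m ≥ 10
      have h10 : 10 ≤ m := by omega
      rw [ih (m / 10) (by omega) (by omega)]
      rw [Nat.toDigits_of_base_le (by norm_num) h10]
      rw [pvSum_append_digit _ _ (by omega)]
      simp only [List.length_append, List.length_cons, List.length_nil]
      push_cast
      ring

-- ===== VERDICT (by name: the statement is the Claim_ definition above) =====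
theorem mirrorDistance_spec : Claim_equal_mirrorDistance := by
  intro n _
  unfold Spec_mirrorDistance mirrorDistance mirrorDistance_alt
  by_cases hle : n ≤ 0
  · rw [pvRevAux_nonpos n 0 (by omega)]
    simp [hle]
  · have hpos : 0 < n := by omega
    have hn : n = ((n.toNat : Nat) : Int) := by omega
    have hrev : pvRevAux n 0 = pvSum (Nat.toDigits 10 n.toNat) := by
      conv_lhs => rw [hn]
      rw [pvRevAux_eq_pvSum n.toNat (by omega) 0]
      ring
    have hchars : PySem.Int.toChars n = Nat.toDigits 10 n.toNat := by
      unfold PySem.Int.toChars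
      simp [show ¬ n < 0 by omega]
    rw [if_neg hle, hchars, hrev]
    rfl
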